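-- pv_equiv track=rewrite | github.com/pypi-data/pypi-mirror-397 | packages/flow-compute/flow_compute-0.1.11a2.tar.gz/flow_compute-0.1.11a2/src/flow/adapters/providers/builtin/mithril/bidding/manager.py | _calculate_chunks
-- ===== SOURCE A (Python) =====
-- def _calculate_chunks(total_quantity: int, chunk_size: int, min_quantity: int) -> list[int]:
--     chunks: list[int] = []
--     remaining = total_quantity
--     while remaining > 0:
--         current = min(chunk_size, remaining)
--         if current >= min_quantity:
--             chunks.append(current)
--             remaining -= current
--         else:
--             if chunks:
--                 chunks[-1] += remaining
--             else:
--                 chunks.append(remaining)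
--             break
--     return chunks
-- ===== SOURCE B (Python) =====
-- def _calculate_chunks(total_quantity: int, chunk_size: int, min_quantity: int) -> list[int]:
--     if total_quantity <= 0:
--         return []
--     if min(chunk_size, total_quantity) < min_quantity:
--         return [total_quantity]
--     full, r = divmod(total_quantity, chunk_size)
--     chunks = [chunk_size] * full
--     if r > 0:
--         if r >= min_quantity:
--             chunks.append(r)
--         else:
--             chunks[-1] += r
--     return chunks
-- ===== Notes on version B (the rewrite author's own statement) =====
-- stated objective: simpler
-- what changed: Replaced A's repeated-subtraction while loop by a divmod closed form: full chunks via [chunk_size]*(total//chunk_size), then the remainder appended or merged into the last chunk; the collapse case min(chunk_size,total)<min_quantity is returned up front.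
import Mathlib
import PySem

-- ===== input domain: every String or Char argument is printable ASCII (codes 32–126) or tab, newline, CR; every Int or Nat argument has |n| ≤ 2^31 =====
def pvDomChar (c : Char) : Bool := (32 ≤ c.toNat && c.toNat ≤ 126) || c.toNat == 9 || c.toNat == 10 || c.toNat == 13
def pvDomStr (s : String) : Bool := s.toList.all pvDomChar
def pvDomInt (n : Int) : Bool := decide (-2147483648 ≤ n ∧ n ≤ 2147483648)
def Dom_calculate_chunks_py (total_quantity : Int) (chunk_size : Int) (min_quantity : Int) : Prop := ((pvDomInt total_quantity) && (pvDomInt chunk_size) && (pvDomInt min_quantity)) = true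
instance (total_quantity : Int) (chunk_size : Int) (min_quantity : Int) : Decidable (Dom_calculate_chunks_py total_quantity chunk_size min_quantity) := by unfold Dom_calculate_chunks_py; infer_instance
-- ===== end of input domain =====

-- B replaces A's repeated-subtraction loop by a single divmod closed form ([chunk_size]*full plus
-- remainder handling); objective: simpler. Equivalence is on the return value, on Pre_ (where A terminates).

-- ===== PORT A =====
-- fuel-indexed transliteration of A's while loop; fuel total_quantity.toNat + 1 suffices on Pre_
-- (each appending iteration subtracts current ≥ 1 there), outside Pre_ the Python loop never returns.
def chunkLoopA (fuel : Nat) (remaining chunk_size min_quantity : Int) (chunks : List Int) : List Int :=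
  match fuel with
  | 0 => chunks
  | f + 1 =>
    if remaining > 0 then
      -- current = min chunk_size remaining, inlined
      if min chunk_size remaining ≥ min_quantity then
        chunkLoopA f (remaining - min chunk_size remaining) chunk_size min_quantity
          (chunks ++ [min chunk_size remaining])
      else
        if chunks ≠ [] then chunks.dropLast ++ [chunks.getLast! + remaining]
        else chunks ++ [remaining]
    else chunks

def calculate_chunks_py (total_quantity : Int) (chunk_size : Int) (min_quantity : Int) : List Int :=
  chunkLoopA (total_quantity.toNat + 1) total_quantity chunk_size min_quantity []

-- ===== PORT B =====
def calculate_chunks_py_alt (total_quantity : Int) (chunk_size : Int) (min_quantity : Int) : List Int :=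
  if total_quantity ≤ 0 then []
  else if min chunk_size total_quantity < min_quantity then [total_quantity]
  else
    let full := PySem.Int.floordiv total_quantity chunk_size
    let r := PySem.Int.mod total_quantity chunk_size
    let chunks := List.replicate full.toNat chunk_size
    if r > 0 then
      if r ≥ min_quantity then chunks ++ [r]
      else chunks.dropLast ++ [chunks.getLast! + r]
    else chunks

-- ===== PRECONDITION & SPEC =====
-- Pre_ excludes exactly the inputs on which A's while loop never terminates (remaining never decreases):
-- total_quantity > 0 with chunk_size ≤ 0 and min_quantity ≤ chunk_size.
def Pre_calculate_chunks_py (total_quantity : Int) (chunk_size : Int) (min_quantity : Int) : Prop :=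
  ¬ (total_quantity > 0 ∧ chunk_size ≤ 0 ∧ min_quantity ≤ chunk_size)
instance (total_quantity : Int) (chunk_size : Int) (min_quantity : Int) : Decidable (Pre_calculate_chunks_py total_quantity chunk_size min_quantity) := by unfold Pre_calculate_chunks_py; infer_instance

def pvWitness_calculate_chunks_py : Int × Int × Int := (10, 3, 2)

def Spec_calculate_chunks_py (total_quantity : Int) (chunk_size : Int) (min_quantity : Int) (out : List Int) : Prop := out = calculate_chunks_py_alt total_quantity chunk_size min_quantity
instance (total_quantity : Int) (chunk_size : Int) (min_quantity : Int) (out : List Int) : Decidable (Spec_calculate_chunks_py total_quantity chunk_size min_quantity out) := by unfold Spec_calculate_chunks_py; infer_instance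

-- ===== CLAIM (what is proved, stated in full; the proofs are below) =====
def Claim_equal_calculate_chunks_py : Prop := ∀ (total_quantity : Int) (chunk_size : Int) (min_quantity : Int), Dom_calculate_chunks_py total_quantity chunk_size min_quantity → Pre_calculate_chunks_py total_quantity chunk_size min_quantity → Spec_calculate_chunks_py total_quantity chunk_size min_quantity (calculate_chunks_py total_quantity chunk_size min_quantity)

-- ===== LEMMAS AND PROOFS =====

-- the tail of B's closed form, parametrised by the chunks accumulated so far
def tailSpec (rem chunk_size min_quantity : Int) (chunks : List Int) : List Int :=
  if rem ≤ 0 then chunks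
  else if rem % chunk_size > 0 then
    if rem % chunk_size ≥ min_quantity then
      (chunks ++ List.replicate (rem / chunk_size).toNat chunk_size) ++ [rem % chunk_size]
    else
      (chunks ++ List.replicate (rem / chunk_size).toNat chunk_size).dropLast
        ++ [(chunks ++ List.replicate (rem / chunk_size).toNat chunk_size).getLast! + rem % chunk_size]
  else chunks ++ List.replicate (rem / chunk_size).toNat chunk_size

theorem chunkLoopA_nonpos (fuel : Nat) (rem cs mq : Int) (chunks : List Int) (h : rem ≤ 0) :
    chunkLoopA fuel rem cs mq chunks = chunks := by
  cases fuel with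
  | zero => rfl
  | succ f => rw [chunkLoopA, if_neg (by omega : ¬ rem > 0)]

theorem chunkLoopA_eq_tailSpec (cs mq : Int) (hcs : 0 < cs) (hmq : mq ≤ cs) :
    ∀ (fuel : Nat) (rem : Int) (chunks : List Int), 0 ≤ rem → rem.toNat < fuel → chunks ≠ [] →
    chunkLoopA fuel rem cs mq chunks = tailSpec rem cs mq chunks := by
  intro fuel
  induction fuel with
  | zero => intro rem chunks _ h; omega
  | succ f ih =>
    intro rem chunks h0 hf hne
    by_cases hpos : rem > 0
    · by_cases hge : rem ≥ cs
      · -- current = cs, a full chunk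
        have hcur : min cs rem = cs := by omega
        have hcc : cs ≥ mq := hmq
        rw [chunkLoopA, if_pos hpos, hcur, if_pos hcc]
        rw [ih (rem - cs) (chunks ++ [cs]) (by omega) (by omega) (by simp)]
        -- now identify tailSpec (rem-cs) (chunks++[cs]) with tailSpec rem chunks
        have hdiv : (rem - cs) / cs = rem / cs - 1 := by
          have := Int.add_mul_ediv_right rem (-1) (by omega : cs ≠ 0)
          have : (rem + -1 * cs) / cs = rem / cs + -1 := this
          have he : rem - cs = rem + -1 * cs := by ring
          rw [he, this]; ring
        have hmod : (rem - cs) % cs = rem % cs := by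
          have := Int.add_mul_emod_self_left (a := rem) (b := cs) (c := (-1))
          calc (rem - cs) % cs = (rem + cs * -1) % cs := by ring_nf
            _ = rem % cs := this
        have hq1 : 1 ≤ rem / cs := by
          have := Int.ediv_le_ediv hcs hge
          simpa [Int.ediv_self (by omega : cs ≠ 0)] using this
        by_cases hz : rem - cs ≤ 0
        · -- rem = cs exactly
          have hrc : rem = cs := by omega
          subst hrc
          rw [tailSpec, if_pos (by omega : rem - rem ≤ 0)]
          rw [tailSpec, if_neg (by omega : ¬ rem ≤ 0), Int.emod_self,
            if_neg (by omega : ¬ (0:ℤ) > 0), Int.ediv_self (by omega : rem ≠ 0)]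
          simp [List.replicate]
        · have hq : (rem / cs).toNat = ((rem - cs) / cs).toNat + 1 := by
            rw [hdiv]
            have h2 : 1 ≤ (rem - cs) / cs + 1 := by omega
            omega
          have hrep : List.replicate (rem / cs).toNat cs
              = cs :: List.replicate ((rem - cs) / cs).toNat cs := by
            rw [hq]; rfl
          simp only [tailSpec, if_neg hz, if_neg (by omega : ¬ rem ≤ 0), hmod, hrep]
          have : chunks ++ [cs] ++ List.replicate ((rem - cs) / cs).toNat cs
              = chunks ++ cs :: List.replicate ((rem - cs) / cs).toNat cs := by simp
          rw [this]
      · -- rem < cs : current = rem, last (partial) step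
        have hcur : min cs rem = rem := by omega
        have hq0 : rem / cs = 0 := Int.ediv_eq_zero_of_lt h0 (by omega)
        have hm : rem % cs = rem := Int.emod_eq_of_lt h0 (by omega)
        rw [chunkLoopA, if_pos hpos, hcur]
        by_cases hgm : rem ≥ mq
        · rw [if_pos hgm]
          rw [chunkLoopA_nonpos _ _ _ _ _ (by omega : rem - rem ≤ 0)]
          rw [tailSpec, if_neg (by omega : ¬ rem ≤ 0), hq0, hm,
            if_pos hpos, if_pos hgm]
          simp
        · rw [if_neg hgm, if_pos hne]
          rw [tailSpec, if_neg (by omega : ¬ rem ≤ 0), hq0, hm,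
            if_pos hpos, if_neg hgm]
          simp
    · rw [chunkLoopA_nonpos _ _ _ _ _ (by omega), tailSpec, if_pos (by omega : rem ≤ 0)]

-- ===== VERDICT (by name: the statement is the Claim_ definition above) =====
theorem calculate_chunks_py_spec : Claim_equal_calculate_chunks_py := by
  intro t cs mq _ hpre
  unfold Spec_calculate_chunks_py calculate_chunks_py calculate_chunks_py_alt
  by_cases ht : t ≤ 0
  · rw [chunkLoopA_nonpos _ _ _ _ _ ht]; simp [ht]
  · have htp : 0 < t := by omega
    rw [if_neg ht]
    by_cases hcol : min cs t < mq
    · -- collapse: first iteration breaks with empty chunks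
      rw [if_pos hcol, chunkLoopA]
      simp only [if_pos htp]
      rw [if_neg (by omega : ¬ min cs t ≥ mq)]
      simp
    · rw [if_neg hcol]
      have hmqc : mq ≤ cs := by omega
      have hmqt : mq ≤ t := by omega
      have hcs : 0 < cs := by
        by_contra h
        exact hpre ⟨htp, by omega, by omega⟩
      rw [chunkLoopA]
      simp only [if_pos htp]
      rw [if_pos (by omega : min cs t ≥ mq)]
      have hfd : PySem.Int.floordiv t cs = t / cs :=
        PySem.Int.floordiv_eq_ediv_of_pos hcs
      have hmd : PySem.Int.mod t cs = t % cs :=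
        PySem.Int.mod_eq_emod_of_pos hcs
      by_cases hge : t ≥ cs
      · have hcur : min cs t = cs := by omega
        rw [hcur]
        rw [chunkLoopA_eq_tailSpec cs mq hcs hmqc t.toNat (t - cs) ([] ++ [cs])
            (by omega) (by omega) (by simp)]
        have hdiv : (t - cs) / cs = t / cs - 1 := by
          have h1 : (t + -1 * cs) / cs = t / cs + -1 := Int.add_mul_ediv_right t (-1) (by omega)
          have he : t - cs = t + -1 * cs := by ring
          rw [he, h1]; ring
        have hmod : (t - cs) % cs = t % cs := by
          have := Int.add_mul_emod_self_left (a := t) (b := cs) (c := (-1))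
          calc (t - cs) % cs = (t + cs * -1) % cs := by ring_nf
            _ = t % cs := this
        have hq1 : 1 ≤ t / cs := by
          have := Int.ediv_le_ediv hcs hge
          simpa [Int.ediv_self (by omega : cs ≠ 0)] using this
        rw [hfd, hmd]
        by_cases hz : t - cs ≤ 0
        · have hrc : t = cs := by omega
          have hq : t / cs = 1 := by rw [hrc]; exact Int.ediv_self (by omega)
          have hm : t % cs = 0 := by rw [hrc]; simp
          simp [tailSpec, hz, hq, hm, List.replicate]
        · have hq : (t / cs).toNat = ((t - cs) / cs).toNat + 1 := by
            rw [hdiv]; omega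
          have hrep : List.replicate (t / cs).toNat cs
              = cs :: List.replicate ((t - cs) / cs).toNat cs := by rw [hq]; rfl
          simp only [tailSpec, if_neg hz, hmod, hrep, List.nil_append]
          have hcons : [cs] ++ List.replicate ((t - cs) / cs).toNat cs
              = cs :: List.replicate ((t - cs) / cs).toNat cs := by simp
          rw [hcons]
      · -- t < cs : single chunk
        have hcur : min cs t = t := by omega
        rw [hcur]
        rw [chunkLoopA_nonpos _ _ _ _ _ (by omega : t - t ≤ 0)]
        have hq0 : t / cs = 0 := Int.ediv_eq_zero_of_lt (by omega) (by omega)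
        have hm : t % cs = t := Int.emod_eq_of_lt (by omega) (by omega)
        rw [hfd, hmd, hq0, hm]
        simp [htp, hmqt]
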